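-- pv_equiv track=rewrite | github.com/Mickleburg/HackatonCentralUniversity | src/merge_predictions.py | merge_multiple
-- ===== SOURCE A (Python) =====
-- from typing import List, Tuple, Set
--
-- def _spans_overlap(span1: Tuple[int, int], span2: Tuple[int, int]) -> bool:
--     """
--     Проверяет, пересекаются ли два span'а.
--     """
--     start1, end1 = span1
--     start2, end2 = span2
--     return not (end1 <= start2 or end2 <= start1)
--
-- def merge_predictions(
--     regex_spans: List[Tuple[int, int, str]],
--     ner_spans: List[Tuple[int, int, str]]
-- ) -> List[Tuple[int, int, str]]:
--     """
--     Слияние regex (приоритет) и NER предсказаний с обработкой пересечений.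
--     """
--     if not regex_spans and not ner_spans:
--         return []
--
--     result_set: Set[Tuple[int, int, str]] = set(regex_spans or [])
--
--     for ner_start, ner_end, ner_label in ner_spans or []:
--         overlaps_with_regex = any(
--             _spans_overlap((ner_start, ner_end), (regex_start, regex_end))
--             for regex_start, regex_end, _ in (regex_spans or [])
--         )
--         if not overlaps_with_regex:
--             result_set.add((ner_start, ner_end, ner_label))
--
--     return sorted(result_set, key=lambda x: (x[0], x[1], x[2]))
--
-- def merge_multiple(
--     predictions: List[List[Tuple[int, int, str]]],
--     weights: List[float] = None
-- ) -> List[Tuple[int, int, str]]: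
--     """
--     Слияние нескольких списков предсказаний.
--     """
--     if not predictions:
--         return []
--
--     result = sorted(set(predictions[0]), key=lambda x: (x[0], x[1], x[2]))
--     for pred in predictions[1:]:
--         result = merge_predictions(result, pred)
--
--     return result
-- ===== SOURCE B (Python) =====
-- from typing import List, Tuple
--
--
-- def _bisect_left(xs: List[int], x: int) -> int:
--     """Index of the first element >= x in the ascending list xs (hand-written, no bisect import)."""
--     lo, hi = 0, len(xs)
--     while lo < hi:
--         mid = (lo + hi) // 2
--         if xs[mid] < x:
--             lo = mid + 1
--         else:
--             hi = mid
--     return lo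
--
--
-- def _scan_max(ends: List[int]) -> List[int]:
--     """Running maxima of ends."""
--     out = []
--     cur = None
--     for e in ends:
--         if cur is None or e > cur:
--             cur = e
--         out.append(cur)
--     return out
--
--
-- def _merge_step(result, pred):
--     """Add to the set `result` every span of pred that overlaps no span already in result."""
--     spans = sorted((s, e) for s, e, _ in result)
--     starts = [s for s, _ in spans]
--     premax = _scan_max([e for _, e in spans])
--     fresh = []
--     for t in pred:
--         k = _bisect_left(starts, t[1])
--         if k == 0 or premax[k - 1] <= t[0]:
--             fresh.append(t)
--     result.update(fresh)
--     return result
--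
--
-- def merge_multiple(
--     predictions: List[List[Tuple[int, int, str]]],
--     weights: List[float] = None
-- ) -> List[Tuple[int, int, str]]:
--     if not predictions:
--         return []
--     result = set(predictions[0])
--     for pred in predictions[1:]:
--         result = _merge_step(result, pred)
--     return sorted(result)
-- ===== Notes on version B (the rewrite author's own statement) =====
-- stated objective: faster
-- what changed: Per merge step the accumulated spans are sorted by start once and each candidate span is tested by binary search against a prefix-maximum-of-ends array, replacing A's linear scan of all accumulated spans per candidate; the output is sorted once at the end instead of after every step.
import Mathlib
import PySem

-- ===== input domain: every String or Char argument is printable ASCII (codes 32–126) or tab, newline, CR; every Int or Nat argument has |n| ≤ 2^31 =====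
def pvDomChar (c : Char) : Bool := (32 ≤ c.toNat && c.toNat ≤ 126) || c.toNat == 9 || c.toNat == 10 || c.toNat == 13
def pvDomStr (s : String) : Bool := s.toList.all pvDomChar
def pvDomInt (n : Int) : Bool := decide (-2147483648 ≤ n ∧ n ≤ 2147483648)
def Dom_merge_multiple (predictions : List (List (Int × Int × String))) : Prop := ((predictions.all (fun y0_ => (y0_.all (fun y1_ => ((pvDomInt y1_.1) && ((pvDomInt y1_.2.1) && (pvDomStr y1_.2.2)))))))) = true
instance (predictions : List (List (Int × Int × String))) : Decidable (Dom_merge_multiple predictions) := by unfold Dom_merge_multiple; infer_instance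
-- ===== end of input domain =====

-- B replaces A's per-candidate linear scan of the accumulated spans by one sort + binary search
-- against a prefix-maximum-of-ends array per merge step, and sorts the result once at the end.
-- (A's `weights` parameter is unused by A and by B; per the type convention it is not part of the signature.)

-- ===== PORT A =====
-- Python's tuple sort key  lambda x: (x[0], x[1], x[2])  : lexicographic comparison of the 3-tuple
def spanKey (x : Int × Int × String) : Lex (Int × Lex (Int × String)) :=
  toLex (x.1, toLex (x.2.1, x.2.2))

-- _spans_overlap(span1, span2) = not (end1 <= start2 or end2 <= start1)
def spansOverlap (span1 span2 : Int × Int) : Bool :=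
  !(decide (span1.2 ≤ span2.1) || decide (span2.2 ≤ span1.1))

def merge_predictions (regex_spans ner_spans : List (Int × Int × String)) :
    List (Int × Int × String) :=
  if regex_spans = [] ∧ ner_spans = [] then []
  else
    let result_set :=
      ner_spans.foldl (fun acc t =>
        let overlaps := regex_spans.any (fun r => spansOverlap (t.1, t.2.1) (r.1, r.2.1))
        if !overlaps then PySem.Set.add acc t else acc)
        (PySem.Set.ofList regex_spans)
    PySem.List.sorted result_set spanKey

def merge_multiple (predictions : List (List (Int × Int × String))) : List (Int × Int × String) :=
  match predictions with
  | [] => []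
  | p0 :: rest =>
    rest.foldl (fun result pred => merge_predictions result pred)
      (PySem.List.sorted (PySem.Set.ofList p0) spanKey)

-- ===== PORT B =====
-- Python's default sort of int pairs: lexicographic
def pairKey (p : Int × Int) : Lex (Int × Int) := toLex p

-- _scan_max(cur, ends): running maxima of ends, seeded with cur (none = no seed)
def scanMax : Option Int → List Int → List Int
  | _, [] => []
  | cur, e :: es =>
    let c := match cur with
      | none => e
      | some m => if e > m then e else m
    c :: scanMax (some c) es

-- the filter condition of _merge_step: k == 0 or premax[k-1] <= t[0]
def keepSpan (starts premax : List Int) (a b : Int) : Bool :=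
  let k := PySem.List.bisectLeft starts b
  decide (k = 0) || decide (premax.getD (k - 1) 0 ≤ a)

-- _merge_step(result, pred)
def mergeStep (result : PySem.Set (Int × Int × String)) (pred : List (Int × Int × String)) :
    PySem.Set (Int × Int × String) :=
  let spans := PySem.List.sorted (result.map (fun t => (t.1, t.2.1))) pairKey
  let starts := spans.map (fun p => p.1)
  let premax := scanMax none (spans.map (fun p => p.2))
  PySem.Set.update result (pred.filter (fun t => keepSpan starts premax t.1 t.2.1))

def merge_multiple_alt (predictions : List (List (Int × Int × String))) :
    List (Int × Int × String) :=
  match predictions with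
  | [] => []
  | p0 :: rest =>
    PySem.List.sorted (rest.foldl mergeStep (PySem.Set.ofList p0)) spanKey

-- ===== PRECONDITION & SPEC =====
def Spec_merge_multiple (predictions : List (List (Int × Int × String))) (out : List (Int × Int × String)) : Prop := out = merge_multiple_alt predictions
instance (predictions : List (List (Int × Int × String))) (out : List (Int × Int × String)) : Decidable (Spec_merge_multiple predictions out) := by unfold Spec_merge_multiple; infer_instance

-- ===== CLAIM (what is proved, stated in full; the proofs are below) =====
def Claim_equal_merge_multiple : Prop := ∀ (predictions : List (List (Int × Int × String))), Dom_merge_multiple predictions → Spec_merge_multiple predictions (merge_multiple predictions)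

-- ===== LEMMAS AND PROOFS =====

lemma spanKey_injective : Function.Injective spanKey := by
  rintro ⟨a, b, c⟩ ⟨d, e, f⟩ h
  have h1 := congrArg ofLex h
  simp only [spanKey, ofLex_toLex, Prod.mk.injEq] at h1
  have h2 := congrArg ofLex h1.2
  simp only [ofLex_toLex, Prod.mk.injEq] at h2
  simp [h1.1, h2.1, h2.2]

lemma lt_scanMax_iff (es : List Int) (cur : Option Int) (a : Int) (i : Nat)
    (hi : i < es.length) :
    a < (scanMax cur es).getD i 0 ↔
      (∃ j, ∃ hj : j < es.length, j ≤ i ∧ a < es[j]) ∨ (∃ m, cur = some m ∧ a < m) := by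
  induction es generalizing cur i with
  | nil => simp at hi
  | cons e es ih =>
    have hc : ∀ c, (c = match cur with | none => e | some m => if e > m then e else m) →
        (a < c ↔ a < e ∨ (∃ m, cur = some m ∧ a < m)) := by
      intro c hcdef
      cases cur with
      | none => simp [hcdef]
      | some m =>
        subst hcdef
        simp only [Option.some.injEq]
        constructor
        · intro h
          by_cases hm : e > m
          · simp [hm] at h; exact Or.inl h
          · simp [hm] at h; exact Or.inr ⟨m, rfl, h⟩
        · rintro (h | ⟨m', hm', h⟩)
          · split <;> omega
          · cases hm'; split <;> omega
    match i with
    | 0 =>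
      simp only [scanMax, List.getD_cons_zero]
      rw [hc _ rfl]
      constructor
      · rintro (h | h)
        · exact Or.inl ⟨0, by simp, le_refl 0, by simpa⟩
        · exact Or.inr h
      · rintro (⟨j, hj, hj0, hja⟩ | h)
        · interval_cases j
          exact Or.inl (by simpa using hja)
        · exact Or.inr h
    | i + 1 =>
      have hi' : i < es.length := by simpa using hi
      simp only [scanMax, List.getD_cons_succ]
      generalize hcdef : (match cur with | none => e | some m => if e > m then e else m) = c0
      have hc0 : a < c0 ↔ a < e ∨ (∃ m, cur = some m ∧ a < m) := hc c0 hcdef.symm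
      rw [ih (some c0) i hi']
      simp only [Option.some.injEq]
      constructor
      · rintro (⟨j, hj, hji, hja⟩ | ⟨m, hm, h⟩)
        · exact Or.inl ⟨j + 1, by simpa using hj, by omega, by simpa using hja⟩
        · subst hm
          rcases hc0.mp h with h | h
          · exact Or.inl ⟨0, by simp, by omega, by simpa⟩
          · exact Or.inr h
      · rintro (⟨j, hj, hji, hja⟩ | h)
        · match j with
          | 0 => exact Or.inr ⟨c0, rfl, hc0.mpr (Or.inl (by simpa using hja))⟩
          | j + 1 => exact Or.inl ⟨j, by simpa using hj, by omega, by simpa using hja⟩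
        · exact Or.inr ⟨c0, rfl, hc0.mpr (Or.inr h)⟩

lemma starts_pairwise (L : List (Int × Int)) :
    ((PySem.List.sorted L pairKey).map (fun p => p.1)).Pairwise (· ≤ ·) := by
  rw [List.pairwise_map]
  have h := PySem.List.sorted_pairwise L pairKey
  refine h.imp ?_
  intro p q hpq
  rcases Prod.Lex.le_iff.mp hpq with h1 | ⟨h1, _⟩
  · exact le_of_lt h1
  · exact le_of_eq h1

-- the binary-search + prefix-max test says exactly "no accumulated span overlaps (a, b)"
lemma keep_eq (S : List (Int × Int × String)) (a b : Int) :
    keepSpan ((PySem.List.sorted (S.map (fun t => (t.1, t.2.1))) pairKey).map (fun p => p.1))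
        (scanMax none ((PySem.List.sorted (S.map (fun t => (t.1, t.2.1))) pairKey).map (fun p => p.2)))
        a b
      = !(S.any (fun r => spansOverlap (a, b) (r.1, r.2.1))) := by
  set L := S.map (fun t => (t.1, t.2.1)) with hL
  set spans := PySem.List.sorted L pairKey with hspans
  set starts := spans.map (fun p => p.1) with hstarts
  set ends := spans.map (fun p => p.2) with hends
  have hlen_s : starts.length = spans.length := by simp [hstarts]
  have hlen_e : ends.length = spans.length := by simp [hends]
  have hs_get : ∀ (i : Nat) (h : i < spans.length), starts[i]'(by omega) = spans[i].1 := by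
    intro i h
    simp [hstarts]
  have he_get : ∀ (i : Nat) (h : i < spans.length), ends[i]'(by omega) = spans[i].2 := by
    intro i h
    simp [hends]
  obtain ⟨hk_le, hlt, hge⟩ := PySem.List.bisectLeft_spec starts b (starts_pairwise L)
  set k := PySem.List.bisectLeft starts b with hk
  have hblocked : (S.any (fun r => spansOverlap (a, b) (r.1, r.2.1)) = true)
      ↔ ∃ i, ∃ hi : i < spans.length, spans[i].1 < b ∧ a < spans[i].2 := by
    rw [List.any_eq_true]
    constructor
    · rintro ⟨r, hr, hov⟩
      have hmem : (r.1, r.2.1) ∈ spans :=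
        (PySem.List.mem_sorted L pairKey false _).mpr (List.mem_map_of_mem hr)
      obtain ⟨i, hi, hival⟩ := List.mem_iff_getElem.mp hmem
      have hov' : r.1 < b ∧ a < r.2.1 := by simpa [spansOverlap] using hov
      refine ⟨i, hi, ?_, ?_⟩
      · rw [hival]; exact hov'.1
      · rw [hival]; exact hov'.2
    · rintro ⟨i, hi, h1, h2⟩
      have hmem : spans[i] ∈ L :=
        (PySem.List.mem_sorted L pairKey false _).mp (List.getElem_mem hi)
      obtain ⟨r, hr, hrval⟩ := List.mem_map.mp hmem
      refine ⟨r, hr, ?_⟩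
      have e1 : r.1 = spans[i].1 := by rw [← hrval]
      have e2 : r.2.1 = spans[i].2 := by rw [← hrval]
      simp [spansOverlap, e1, e2]
      omega
  have hfast : (keepSpan starts (scanMax none ends) a b = true)
      ↔ ¬ ∃ i, ∃ hi : i < spans.length, spans[i].1 < b ∧ a < spans[i].2 := by
    simp only [keepSpan, ← hk, Bool.or_eq_true, decide_eq_true_eq]
    constructor
    · rintro h ⟨i, hi, h1, h2⟩
      have hik : i < k := by
        by_contra hik
        have h3 := hge i (by omega) (by omega)
        rw [hs_get i hi] at h3
        omega
      rcases h with h | h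
      · omega
      · have hk1 : k - 1 < ends.length := by omega
        have := (lt_scanMax_iff ends none a (k - 1) hk1).mpr
          (Or.inl ⟨i, by omega, by omega, by rw [he_get i hi]; exact h2⟩)
        omega
    · intro hno
      by_cases hk0 : k = 0
      · exact Or.inl hk0
      · refine Or.inr ?_
        by_contra hgt
        push Not at hgt
        have hk1 : k - 1 < ends.length := by omega
        rcases (lt_scanMax_iff ends none a (k - 1) hk1).mp hgt with ⟨j, hj, hjk, hja⟩ | ⟨m, hm, _⟩
        · refine hno ⟨j, by omega, ?_, ?_⟩
          · have h3 := hlt j (by omega) (by omega)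
            rwa [hs_get j (by omega)] at h3
          · rwa [he_get j (by omega)] at hja
        · simp at hm
  rw [Bool.eq_iff_iff, Bool.not_eq_true', ← Bool.not_eq_true (S.any _), hblocked]
  exact hfast

lemma foldl_add_filter {α : Type} [BEq α] (pred : List α) (p : α → Bool)
    (s : PySem.Set α) :
    pred.foldl (fun acc t => if p t then PySem.Set.add acc t else acc) s
      = PySem.Set.update s (pred.filter p) := by
  induction pred generalizing s with
  | nil => simp [PySem.Set.update]
  | cons t ts ih =>
    by_cases h : p t = true
    · simp [h, ih, PySem.Set.update]
    · simp [h, ih, PySem.Set.update]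

lemma step_eq (S : PySem.Set (Int × Int × String)) (hnd : S.Nodup)
    (pred : List (Int × Int × String)) :
    merge_predictions (PySem.List.sorted S spanKey) pred
      = PySem.List.sorted (mergeStep S pred) spanKey := by
  have hperm : (PySem.List.sorted S spanKey).Perm S := PySem.List.sorted_perm S spanKey false
  have hndA : (PySem.List.sorted S spanKey).Nodup := hperm.nodup_iff.mpr hnd
  by_cases hguard : PySem.List.sorted S spanKey = [] ∧ pred = []
  · obtain ⟨h1, h2⟩ := hguard
    have hS : S = [] := (PySem.List.sorted_eq_nil_iff S spanKey false).mp h1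
    subst hS h2
    rfl
  · simp only [merge_predictions, if_neg hguard]
    have hfc : pred.filter (fun t => !((PySem.List.sorted S spanKey).any
          (fun r => spansOverlap (t.1, t.2.1) (r.1, r.2.1))))
        = pred.filter (fun t =>
            keepSpan ((PySem.List.sorted (S.map (fun t => (t.1, t.2.1))) pairKey).map (fun p => p.1))
              (scanMax none ((PySem.List.sorted (S.map (fun t => (t.1, t.2.1))) pairKey).map (fun p => p.2)))
              t.1 t.2.1) := by
      refine List.filter_congr ?_
      intro t _
      rw [keep_eq S t.1 t.2.1, hperm.any_eq]
    rw [PySem.Set.ofList_eq_self_of_nodup _ hndA,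
      foldl_add_filter pred (fun t => !((PySem.List.sorted S spanKey).any
        (fun r => spansOverlap (t.1, t.2.1) (r.1, r.2.1)))) _,
      hfc]
    simp only [mergeStep]
    refine PySem.List.sorted_eq_sorted_of_perm _ _ spanKey spanKey_injective ?_
    refine (List.perm_ext_iff_of_nodup (PySem.Set.nodup_update _ _ hndA)
      (PySem.Set.nodup_update _ _ hnd)).mpr ?_
    intro x
    simp only [PySem.Set.mem_update]
    rw [hperm.mem_iff]

lemma fold_eq (rest : List (List (Int × Int × String))) (S : PySem.Set (Int × Int × String))
    (hnd : S.Nodup) :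
    rest.foldl (fun result pred => merge_predictions result pred) (PySem.List.sorted S spanKey)
      = PySem.List.sorted (rest.foldl mergeStep S) spanKey := by
  induction rest generalizing S with
  | nil => simp
  | cons p rs ih =>
    simp only [List.foldl_cons, step_eq S hnd p]
    exact ih (mergeStep S p) (PySem.Set.nodup_update _ _ hnd)

-- ===== VERDICT (by name: the statement is the Claim_ definition above) =====
theorem merge_multiple_spec : Claim_equal_merge_multiple := by
  intro predictions _
  unfold Spec_merge_multiple
  match predictions with
  | [] => rfl
  | p0 :: rest =>
    simp only [merge_multiple, merge_multiple_alt]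
    exact fold_eq rest (PySem.Set.ofList p0) (PySem.Set.nodup_ofList p0)
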